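-- pv_equiv track=rewrite | github.com/linux-warrior/algorithms | sprint1/i.py | is_power_of_4
-- ===== SOURCE A (Python) =====
-- def is_power_of_4(value: int) -> bool:
--     if value <= 0:
--         return False
--
--     while value > 1:
--         if value & 3:
--             return False
--
--         value >>= 2
--
--     return True
-- ===== SOURCE B (Python) =====
-- def is_power_of_4(value: int) -> bool:
--     return value > 0 and (value & (value - 1)) == 0 and (value - 1) % 3 == 0
-- ===== Notes on version B (the rewrite author's own statement) =====
-- stated objective: idiomatic
-- what changed: Replaced A's while-loop (which repeatedly masks the low bit-pair and shifts right by two) with a constant-time closed-form predicate: positivity, the power-of-two bit trick (value anded with its predecessor vanishes), and a mod-three test on the predecessor that singles out the even exponents.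
import Mathlib
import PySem

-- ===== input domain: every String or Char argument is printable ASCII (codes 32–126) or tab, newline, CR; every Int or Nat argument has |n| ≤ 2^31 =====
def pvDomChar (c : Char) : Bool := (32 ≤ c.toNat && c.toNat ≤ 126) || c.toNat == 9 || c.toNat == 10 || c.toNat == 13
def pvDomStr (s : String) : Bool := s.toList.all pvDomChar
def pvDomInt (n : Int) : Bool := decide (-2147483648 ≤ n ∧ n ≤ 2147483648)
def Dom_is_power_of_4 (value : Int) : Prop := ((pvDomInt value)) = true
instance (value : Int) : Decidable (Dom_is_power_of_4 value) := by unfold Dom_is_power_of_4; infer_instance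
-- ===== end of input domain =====

-- B replaces A's shift-by-two loop with the constant-time closed-form bit test
-- `value > 0 and (value & (value - 1)) == 0 and (value - 1) % 3 == 0` (idiomatic, no iteration).


-- ===== PORT A =====
-- the `while value > 1` loop of A, step for step
def isPow4Loop (value : Int) : Bool :=
  if 1 < value then
    if PySem.Int.band value 3 ≠ 0 then false
    else isPow4Loop (value >>> (2:Nat))
  else true
termination_by value.toNat
decreasing_by
  have e : value >>> (2:Nat) = value / 4 := by
    rw [Int.shiftRight_eq_div_pow]; norm_num
  rw [e]; omega

def is_power_of_4 (value : Int) : Bool :=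
  if value ≤ 0 then false
  else isPow4Loop value

-- ===== PORT B =====
def is_power_of_4_alt (value : Int) : Bool :=
  decide (0 < value) && (PySem.Int.band value (value - 1) == 0)
    && (PySem.Int.mod (value - 1) 3 == 0)

-- ===== PRECONDITION & SPEC =====
def Spec_is_power_of_4 (value : Int) (out : Bool) : Prop := out = is_power_of_4_alt value
instance (value : Int) (out : Bool) : Decidable (Spec_is_power_of_4 value out) := by unfold Spec_is_power_of_4; infer_instance

-- ===== CLAIM (what is proved, stated in full; the proofs are below) =====
def Claim_equal_is_power_of_4 : Prop := ∀ (value : Int), Dom_is_power_of_4 value → Spec_is_power_of_4 value (is_power_of_4 value)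

-- ===== LEMMAS AND PROOFS =====

-- Nat version of A's loop
def loopN (n : Nat) : Bool :=
  if 1 < n then
    if n % 4 ≠ 0 then false
    else loopN (n / 4)
  else true
termination_by n
decreasing_by omega

theorem isPow4Loop_natCast (n : Nat) : isPow4Loop (n : Int) = loopN n := by
  induction n using Nat.strong_induction_on with
  | _ n ih =>
    rw [isPow4Loop, loopN]
    by_cases h1 : 1 < n
    · have h1' : (1:Int) < (n:Int) := by exact_mod_cast h1
      rw [if_pos h1', if_pos h1]
      have hb : PySem.Int.band (n : Int) 3 = ((n % 4 : Nat) : Int) := by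
        have h := PySem.Int.band_natCast n 3
        rw [Nat.and_two_pow_sub_one_eq_mod n 2] at h
        simpa using h
      by_cases h4 : n % 4 = 0
      · rw [if_neg (by rw [hb, h4]; simp), if_neg (by omega)]
        have hdiv : n >>> 2 = n / 4 := by rw [Nat.shiftRight_eq_div_pow]
        have hs : ((n:Int)) >>> (2:Nat) = ((n >>> 2 : Nat) : Int) := Int.shiftRight_natCast n 2
        rw [hs, hdiv]
        exact ih (n / 4) (by omega)
      · rw [if_pos (by rw [hb]; exact_mod_cast h4), if_pos h4]
    · have h1' : ¬ (1:Int) < (n:Int) := by exact_mod_cast h1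
      rw [if_neg h1', if_neg h1]

-- A's loop accepts exactly the powers of 4
theorem loopN_iff (n : Nat) (hn : 0 < n) : loopN n = true ↔ ∃ k : Nat, n = 4 ^ k := by
  induction n using Nat.strong_induction_on with
  | _ n ih =>
    rw [loopN]
    by_cases h1 : 1 < n
    · rw [if_pos h1]
      by_cases h4 : n % 4 = 0
      · rw [if_neg (by omega)]
        rw [ih (n / 4) (by omega) (by omega)]
        constructor
        · rintro ⟨k, hk⟩; exact ⟨k + 1, by rw [pow_succ]; omega⟩
        · rintro ⟨k, hk⟩
          match k with
          | 0 => omega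
          | k + 1 => exact ⟨k, by rw [pow_succ] at hk; omega⟩
      · rw [if_pos h4]
        refine iff_of_false (by simp) ?_
        rintro ⟨k, hk⟩
        match k with
        | 0 => omega
        | k + 1 => rw [pow_succ] at hk; omega
    · rw [if_neg h1]
      have : n = 1 := by omega
      subst this
      exact iff_of_true rfl ⟨0, rfl⟩

-- n & (n-1) == 0 characterises powers of two (for positive n)
theorem land_pred_eq_zero_iff (n : Nat) (hn : 0 < n) :
    n &&& (n - 1) = 0 ↔ ∃ k : Nat, n = 2 ^ k := by
  induction n using Nat.strong_induction_on with
  | _ n ih =>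
    rcases Nat.lt_or_ge n 2 with h2 | h2
    · have : n = 1 := by omega
      subst this
      exact iff_of_true (by decide) ⟨0, rfl⟩
    · rcases Nat.even_or_odd n with ⟨m, hm⟩ | ⟨m, hm⟩
      · -- n = 2m even, n ≥ 2 so m ≥ 1
        have hm1 : 0 < m := by omega
        have e2 : n - 1 = Nat.bit true (m - 1) := by rw [Nat.bit_val]; simp; omega
        have e1 : n = Nat.bit false m := by rw [Nat.bit_val]; simp; omega
        have e4 : n &&& (n - 1) = 2 * (m &&& (m - 1)) := by
          rw [e2, e1, Nat.land_bit, Nat.bit_val]; simp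
        rw [e4]
        have ihm := ih m (by omega) hm1
        constructor
        · intro h
          obtain ⟨k, hk⟩ := ihm.mp (by omega)
          exact ⟨k + 1, by rw [pow_succ]; omega⟩
        · rintro ⟨k, hk⟩
          match k with
          | 0 => omega
          | k + 1 =>
            have hmk : m = 2 ^ k := by rw [pow_succ] at hk; omega
            have := ihm.mpr ⟨k, hmk⟩
            omega
      · -- n = 2m+1 odd, n ≥ 2 so n ≥ 3, m ≥ 1
        have hm1 : 0 < m := by omega
        have e2 : n - 1 = Nat.bit false m := by rw [Nat.bit_val]; simp; omega
        have e1 : n = Nat.bit true m := by rw [Nat.bit_val]; simp; omega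
        have e3 : n &&& (n - 1) = 2 * (m &&& m) := by
          rw [e2, e1, Nat.land_bit, Nat.bit_val]; simp
        rw [e3, Nat.and_self]
        constructor
        · intro h; omega
        · rintro ⟨k, hk⟩
          match k with
          | 0 => omega
          | k + 1 =>
            exfalso
            rw [pow_succ] at hk; omega
theorem two_pow_mod_three (k : Nat) : 2 ^ k % 3 = if k % 2 = 0 then 1 else 2 := by
  induction k with
  | zero => simp
  | succ k ih =>
    rw [pow_succ, Nat.mul_mod, ih]
    rcases Nat.even_or_odd k with ⟨m, hm⟩ | ⟨m, hm⟩
    · rw [if_pos (by omega), if_neg (by omega)]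
    · rw [if_neg (by omega), if_pos (by omega)]

-- the closed form accepts exactly the powers of 4 (for positive n)
theorem closed_iff (n : Nat) (hn : 0 < n) :
    (n &&& (n - 1) = 0 ∧ (n - 1) % 3 = 0) ↔ ∃ k : Nat, n = 4 ^ k := by
  constructor
  · rintro ⟨h1, h3⟩
    obtain ⟨k, hk⟩ := (land_pred_eq_zero_iff n hn).mp h1
    have hmod := two_pow_mod_three k
    have hkev : k % 2 = 0 := by
      by_contra h
      rw [if_neg h] at hmod
      omega
    refine ⟨k / 2, ?_⟩
    have : (4 : Nat) ^ (k / 2) = 2 ^ (2 * (k / 2)) := by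
      rw [pow_mul]; norm_num
    rw [this, show 2 * (k / 2) = k by omega]
    exact hk
  · rintro ⟨k, hk⟩
    have h2 : n = 2 ^ (2 * k) := by
      rw [hk, pow_mul]; norm_num
    constructor
    · exact (land_pred_eq_zero_iff n hn).mpr ⟨2 * k, h2⟩
    · have hmod := two_pow_mod_three (2 * k)
      rw [if_pos (by omega)] at hmod
      have : 1 ≤ 2 ^ (2 * k) := Nat.one_le_two_pow
      omega

theorem alt_iff (n : Nat) (hn : 0 < n) :
    is_power_of_4_alt (n : Int) = true ↔ (n &&& (n - 1) = 0 ∧ (n - 1) % 3 = 0) := by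
  unfold is_power_of_4_alt
  have hc : ((n:Int)) - 1 = ((n - 1 : Nat) : Int) := by omega
  have hb : PySem.Int.band (n:Int) ((n:Int) - 1) = ((n &&& (n - 1) : Nat) : Int) := by
    rw [hc]
    have h := PySem.Int.band_natCast n (n - 1)
    simpa using h
  have hm : PySem.Int.mod ((n:Int) - 1) 3 = (((n - 1) % 3 : Nat) : Int) := by
    rw [hc, PySem.Int.mod, Int.fmod_eq_emod]
    rw [if_pos (Or.inl (by norm_num)), add_zero]
    push_cast
    ring
  rw [hb, hm]
  simp only [Bool.and_eq_true, decide_eq_true_eq, beq_iff_eq, Nat.cast_eq_zero, Nat.cast_pos]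
  exact ⟨fun ⟨⟨_, h1⟩, h2⟩ => ⟨h1, h2⟩, fun ⟨h1, h2⟩ => ⟨⟨hn, h1⟩, h2⟩⟩

-- ===== VERDICT (by name: the statement is the Claim_ definition above) =====
theorem is_power_of_4_spec : Claim_equal_is_power_of_4 := by
  intro value _
  unfold Spec_is_power_of_4
  by_cases hpos : value ≤ 0
  · rw [is_power_of_4, if_pos hpos]
    unfold is_power_of_4_alt
    rw [decide_eq_false (by omega)]
    simp
  · obtain ⟨n, rfl⟩ : ∃ n : Nat, value = (n : Int) := ⟨value.toNat, by omega⟩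
    have hn : 0 < n := by omega
    rw [is_power_of_4, if_neg (by omega), isPow4Loop_natCast]
    apply Bool.eq_iff_iff.mpr
    rw [loopN_iff n hn, alt_iff n hn, closed_iff n hn]
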